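-- pv_equiv track=rewrite | github.com/MoonGyu1/AlgorithmStudy | GimmeSpoon/programmers/2025programmerscodechallenge/round1/oddeventree.py | solution
-- ===== SOURCE A (Python) =====
-- def solution(nodes, edges):
--     forest = {node : [] for node in nodes}
--     for a, b in edges:
--         forest[a].append(b)
--         forest[b].append(a)
--
--     trees = []
--     included = set()
--     for node in nodes:
--         if node not in included:
--             tree = []
--             searches = [node]
--             included.add(node)
--             while len(searches) > 0:
--                 _node = searches.pop()
--                 tree.append(_node)
--                 for n in forest[_node]:
--                     if n not in included:
--                         searches.append(n)
--                         included.add(n)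
--             trees.append(tree)
--
--     ret = [0, 0]
--     for tree in trees:
--         straight, reverse = 0, 0
--         for node in tree:
--             if (node & 1 and len(forest[node]) & 1) or (not(node & 1) and not(len(forest[node]) & 1)): # st when root, rv when child
--                 reverse += 1
--             else:
--                 straight += 1
--         if straight == len(tree) - 1:
--             ret[0] += 1
--         if reverse == len(tree) - 1:
--             ret[1] += 1
--
--     return ret
-- ===== SOURCE B (Python) =====
-- def solution(nodes, edges):
--     # Union-find by eager relabelling: comp maps each node to its component
--     # label; each edge merges the two labels. Degrees counted directly from
--     # edges instead of adjacency-list lengths; per-label buckets replace the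
--     # explicit DFS trees.
--     comp = {node: node for node in nodes}
--     degree = {node: 0 for node in nodes}
--     for a, b in edges:
--         degree[a] += 1
--         degree[b] += 1
--         ra, rb = comp[a], comp[b]
--         if ra != rb:
--             for n in comp:
--                 if comp[n] == rb:
--                     comp[n] = ra
--
--     buckets = {}  # label -> [size, straight, reverse]
--     for n in comp:
--         r = comp[n]
--         if r not in buckets:
--             buckets[r] = [0, 0, 0]
--         bucket = buckets[r]
--         bucket[0] += 1
--         if (n & 1) == (degree[n] & 1):
--             bucket[2] += 1
--         else:
--             bucket[1] += 1
--
--     ret = [0, 0]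
--     for size, straight, reverse in buckets.values():
--         if straight == size - 1:
--             ret[0] += 1
--         if reverse == size - 1:
--             ret[1] += 1
--     return ret
-- ===== Notes on version B (the rewrite author's own statement) =====
-- stated objective: alternative
-- what changed: Component discovery by adjacency-list + explicit-stack DFS is replaced by an eager-relabelling union-find over node labels (each edge merges two label classes), degrees are counted directly from the edges instead of adjacency-list lengths, and per-label count buckets replace the explicit per-tree node lists.
import Mathlib
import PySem

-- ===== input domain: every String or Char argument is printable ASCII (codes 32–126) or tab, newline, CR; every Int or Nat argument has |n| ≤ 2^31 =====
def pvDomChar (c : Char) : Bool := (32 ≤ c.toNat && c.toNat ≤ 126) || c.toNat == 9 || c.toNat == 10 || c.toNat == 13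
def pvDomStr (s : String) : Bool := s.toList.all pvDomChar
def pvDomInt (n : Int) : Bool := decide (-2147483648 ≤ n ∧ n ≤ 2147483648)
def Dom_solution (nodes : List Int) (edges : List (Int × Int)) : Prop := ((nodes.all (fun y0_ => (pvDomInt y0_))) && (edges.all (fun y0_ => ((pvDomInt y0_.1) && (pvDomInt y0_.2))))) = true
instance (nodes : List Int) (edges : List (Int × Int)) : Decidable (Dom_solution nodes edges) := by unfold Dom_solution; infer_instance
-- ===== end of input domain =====

-- B replaces the adjacency-list + stack DFS component discovery with eager-relabelling
-- union-find over the node labels, degrees counted straight from the edges, and per-label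
-- buckets instead of explicit tree lists (objective: alternative).


-- ===== PORT A =====
-- forest = {node: [] for node in nodes}; for a, b in edges: forest[a].append(b); forest[b].append(a)
-- (Python raises KeyError for an endpoint not in nodes; such inputs are outside Pre_solution)
def forestA (nodes : List Int) (edges : List (Int × Int)) : PySem.Dict Int (List Int) :=
  edges.foldl
    (fun d p => (d.modify p.1 [] (fun l => l ++ [p.2])).modify p.2 [] (fun l => l ++ [p.1]))
    (nodes.foldl (fun d node => d.insert node ([] : List Int)) PySem.Dict.empty)

-- for n in forest[_node]: if n not in included: searches.append(n); included.add(n)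
def dfsInner (searches : List Int) (inc : PySem.Set Int) (ns : List Int) :
    List Int × PySem.Set Int :=
  ns.foldl (fun st n =>
    if PySem.Set.contains st.2 n then st else (st.1 ++ [n], PySem.Set.add st.2 n))
    (searches, inc)

-- while len(searches) > 0: _node = searches.pop(); tree.append(_node); <inner for>
-- (fuel only makes the loop total; nodes.length + 1 iterations always suffice, proved below)
def dfsA (forest : PySem.Dict Int (List Int)) :
    Nat → List Int → PySem.Set Int → List Int → List Int × PySem.Set Int
  | 0, _, inc, tree => (tree, inc)
  | fuel+1, searches, inc, tree =>
    match searches.getLast? with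
    | none => (tree, inc)
    | some x =>
      let st := dfsInner searches.dropLast inc (forest.getD x [])
      dfsA forest fuel st.1 st.2 (tree ++ [x])

-- (node & 1 and len(forest[node]) & 1) or (not(node & 1) and not(len(forest[node]) & 1))
def flagA (forest : PySem.Dict Int (List Int)) (node : Int) : Bool :=
  (PySem.Int.band node 1 != 0 && (((forest.getD node []).length &&& 1) != 0))
  || (PySem.Int.band node 1 == 0 && (((forest.getD node []).length &&& 1) == 0))

-- straight, reverse = 0, 0; for node in tree: …
def treeCount (forest : PySem.Dict Int (List Int)) (tree : List Int) : Int × Int :=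
  tree.foldl (fun p node => if flagA forest node then (p.1, p.2 + 1) else (p.1 + 1, p.2)) (0, 0)

def solution (nodes : List Int) (edges : List (Int × Int)) : List Int :=
  let forest := forestA nodes edges
  let st := nodes.foldl (fun (st : List (List Int) × PySem.Set Int) node =>
      if PySem.Set.contains st.2 node then st
      else
        let r := dfsA forest (nodes.length + 1) [node] (PySem.Set.add st.2 node) []
        (st.1 ++ [r.1], r.2)) ([], PySem.Set.empty)
  let ret := st.1.foldl (fun (r : Int × Int) tree =>
      let c := treeCount forest tree
      (r.1 + (if c.1 == (tree.length : Int) - 1 then 1 else 0),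
       r.2 + (if c.2 == (tree.length : Int) - 1 then 1 else 0))) (0, 0)
  [ret.1, ret.2]

-- ===== PORT B =====
-- degree[a] += 1; degree[b] += 1; ra, rb = comp[a], comp[b];
-- if ra != rb: for n in comp: if comp[n] == rb: comp[n] = ra
def ufStep (st : PySem.Dict Int Int × PySem.Dict Int Int) (p : Int × Int) :
    PySem.Dict Int Int × PySem.Dict Int Int :=
  let deg := (st.2.modify p.1 0 (fun v => v + 1)).modify p.2 0 (fun v => v + 1)
  let ra := st.1.getD p.1 0
  let rb := st.1.getD p.2 0
  let comp := if ra != rb then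
      st.1.keys.foldl (fun c n => if c.getD n 0 == rb then c.insert n ra else c) st.1
    else st.1
  (comp, deg)

-- (n & 1) == (degree[n] & 1)
def flagB (deg : PySem.Dict Int Int) (n : Int) : Bool :=
  PySem.Int.band n 1 == PySem.Int.band (deg.getD n 0) 1

-- bucket[0] += 1; bucket[2] += 1 if reverse-flag else bucket[1] += 1
def bucketStep (comp : PySem.Dict Int Int) (deg : PySem.Dict Int Int)
    (bk : PySem.Dict Int (Int × Int × Int)) (n : Int) : PySem.Dict Int (Int × Int × Int) :=
  let r := comp.getD n 0
  let bk := if bk.contains r then bk else bk.insert r ((0:Int), (0:Int), (0:Int))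
  let t := bk.getD r (0, 0, 0)
  let t := if flagB deg n then (t.1 + 1, t.2.1, t.2.2 + 1) else (t.1 + 1, t.2.1 + 1, t.2.2)
  bk.insert r t

def solution_alt (nodes : List Int) (edges : List (Int × Int)) : List Int :=
  let comp0 := nodes.foldl (fun d n => d.insert n n) PySem.Dict.empty
  let deg0 := nodes.foldl (fun d n => d.insert n (0 : Int)) PySem.Dict.empty
  let st := edges.foldl ufStep (comp0, deg0)
  let buckets := st.1.keys.foldl (bucketStep st.1 st.2) PySem.Dict.empty
  let ret := buckets.values.foldl (fun (r : Int × Int) t =>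
      (r.1 + (if t.2.1 == t.1 - 1 then 1 else 0),
       r.2 + (if t.2.2 == t.1 - 1 then 1 else 0))) (0, 0)
  [ret.1, ret.2]

-- ===== PRECONDITION & SPEC =====
-- Pre_ excludes exactly the inputs where A raises KeyError: an edge endpoint not in nodes.
def Pre_solution (nodes : List Int) (edges : List (Int × Int)) : Prop :=
  ∀ p ∈ edges, p.1 ∈ nodes ∧ p.2 ∈ nodes
instance (nodes : List Int) (edges : List (Int × Int)) : Decidable (Pre_solution nodes edges) := by
  unfold Pre_solution; infer_instance

def pvWitness_solution : List Int × (List (Int × Int)) := ([1, 2, 3, 4, 7], [(1, 2), (3, 4)])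

def Spec_solution (nodes : List Int) (edges : List (Int × Int)) (out : List Int) : Prop := out = solution_alt nodes edges
instance (nodes : List Int) (edges : List (Int × Int)) (out : List Int) : Decidable (Spec_solution nodes edges out) := by unfold Spec_solution; infer_instance

-- ===== CLAIM (what is proved, stated in full; the proofs are below) =====
def Claim_equal_solution : Prop := ∀ (nodes : List Int) (edges : List (Int × Int)), Dom_solution nodes edges → Pre_solution nodes edges → Spec_solution nodes edges (solution nodes edges)

-- ===== LEMMAS AND PROOFS =====

-- symmetric edge relation of the input and its reflexive-transitive closure
def ERel (edges : List (Int × Int)) (x y : Int) : Prop := (x, y) ∈ edges ∨ (y, x) ∈ edges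
def Reach (edges : List (Int × Int)) : Int → Int → Prop := Relation.ReflTransGen (ERel edges)

lemma erel_symm (edges : List (Int × Int)) : Symmetric (ERel edges) := by
  intro x y h; exact h.symm

lemma reach_symm (edges : List (Int × Int)) {x y : Int} (h : Reach edges x y) :
    Reach edges y x := (Relation.ReflTransGen.symmetric (erel_symm edges)) h

lemma erel_mem_nodes {nodes : List Int} {edges : List (Int × Int)}
    (hpre : Pre_solution nodes edges) {x y : Int} (h : ERel edges x y) :
    x ∈ nodes ∧ y ∈ nodes := by
  rcases h with h | h
  · exact ⟨(hpre _ h).1, (hpre _ h).2⟩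
  · exact ⟨(hpre _ h).2, (hpre _ h).1⟩

lemma reach_mem_nodes {nodes : List Int} {edges : List (Int × Int)}
    (hpre : Pre_solution nodes edges) {s z : Int} (hs : s ∈ nodes) (h : Reach edges s z) :
    z ∈ nodes := by
  induction h with
  | refl => exact hs
  | tail _ e _ => exact (erel_mem_nodes hpre e).2

-- adding one (undirected) edge to the closure
lemma reach_append (E : List (Int × Int)) (a b x y : Int) :
    Reach (E ++ [(a, b)]) x y ↔
      Reach E x y ∨ (Reach E x a ∧ Reach E b y) ∨ (Reach E x b ∧ Reach E a y) := by
  constructor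
  · intro h
    induction h with
    | refl => exact Or.inl Relation.ReflTransGen.refl
    | @tail z w hxz e ih =>
      have e' : ERel E z w ∨ (z = a ∧ w = b) ∨ (z = b ∧ w = a) := by
        rcases e with he | he
        · rcases List.mem_append.mp he with h1 | h1
          · exact Or.inl (Or.inl h1)
          · simp only [List.mem_singleton, Prod.mk.injEq] at h1
            exact Or.inr (Or.inl ⟨h1.1, h1.2⟩)
        · rcases List.mem_append.mp he with h1 | h1
          · exact Or.inl (Or.inr h1)
          · simp only [List.mem_singleton, Prod.mk.injEq] at h1
            exact Or.inr (Or.inr ⟨h1.2, h1.1⟩)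
      rcases e' with he | ⟨hza, hwb⟩ | ⟨hzb, hwa⟩
      · rcases ih with ih | ⟨ih1, ih2⟩ | ⟨ih1, ih2⟩
        · exact Or.inl (ih.tail he)
        · exact Or.inr (Or.inl ⟨ih1, ih2.tail he⟩)
        · exact Or.inr (Or.inr ⟨ih1, ih2.tail he⟩)
      · subst hza; subst hwb
        rcases ih with ih | ⟨ih1, ih2⟩ | ⟨ih1, ih2⟩
        · exact Or.inr (Or.inl ⟨ih, Relation.ReflTransGen.refl⟩)
        · exact Or.inr (Or.inl ⟨ih1, Relation.ReflTransGen.refl⟩)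
        · exact Or.inl ih1
      · subst hzb; subst hwa
        rcases ih with ih | ⟨ih1, ih2⟩ | ⟨ih1, ih2⟩
        · exact Or.inr (Or.inr ⟨ih, Relation.ReflTransGen.refl⟩)
        · exact Or.inl ih1
        · exact Or.inr (Or.inr ⟨ih1, Relation.ReflTransGen.refl⟩)
  · have hmono : ∀ {u v : Int}, Reach E u v → Reach (E ++ [(a, b)]) u v := by
      intro u v h
      exact Relation.ReflTransGen.mono
        (fun u v huv => huv.imp (fun h => List.mem_append.mpr (Or.inl h))
                                (fun h => List.mem_append.mpr (Or.inl h))) h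
    have hab : Reach (E ++ [(a, b)]) a b :=
      Relation.ReflTransGen.single (Or.inl (by simp))
    have hba : Reach (E ++ [(a, b)]) b a :=
      Relation.ReflTransGen.single (Or.inr (by simp))
    rintro (h | ⟨h1, h2⟩ | ⟨h1, h2⟩)
    · exact hmono h
    · exact ((hmono h1).trans hab).trans (hmono h2)
    · exact ((hmono h1).trans hba).trans (hmono h2)

-- ===== forest / degree characterization =====

lemma forestA_base_getD (nodes : List Int) (x : Int) :
    ∀ d : PySem.Dict Int (List Int), (∀ y, d.getD y [] = []) →
      ((nodes.foldl (fun d node => d.insert node ([] : List Int)) d).getD x []) = [] := by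
  induction nodes with
  | nil => intro d h; exact h x
  | cons n ns ih =>
    intro d h
    simp only [List.foldl_cons]
    exact ih _ (fun y => by rw [PySem.Dict.getD_insert]; split <;> simp [h y])

lemma forestA_getD (nodes : List Int) (edges : List (Int × Int)) (x : Int) :
    (forestA nodes edges).getD x [] =
      edges.flatMap (fun p =>
        (if p.1 = x then [p.2] else []) ++ (if p.2 = x then [p.1] else [])) := by
  have main : ∀ (es : List (Int × Int)) (d : PySem.Dict Int (List Int)),
      (es.foldl (fun d p => (d.modify p.1 [] (fun l => l ++ [p.2])).modify p.2 [] (fun l => l ++ [p.1])) d).getD x []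
        = d.getD x [] ++ es.flatMap (fun p =>
            (if p.1 = x then [p.2] else []) ++ (if p.2 = x then [p.1] else [])) := by
    intro es
    induction es with
    | nil => intro d; simp
    | cons p ps ih =>
      intro d
      simp only [List.foldl_cons, List.flatMap_cons, ih]
      simp only [PySem.Dict.getD_modify]
      by_cases h1 : x = p.1 <;> by_cases h2 : x = p.2 <;> by_cases h12 : p.2 = p.1 <;>
        simp_all [List.append_assoc, eq_comm]
  unfold forestA
  rw [main]
  rw [forestA_base_getD nodes x PySem.Dict.empty (fun y => by simp [PySem.Dict.getD_empty])]
  simp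

lemma mem_forestA (nodes : List Int) (edges : List (Int × Int)) (x y : Int) :
    y ∈ (forestA nodes edges).getD x [] ↔ ERel edges x y := by
  rw [forestA_getD]
  simp only [List.mem_flatMap, List.mem_append, ERel]
  constructor
  · rintro ⟨p, hp, h | h⟩
    · by_cases h1 : p.1 = x
      · simp only [h1, if_true, List.mem_singleton] at h
        have hpxy : p = (x, y) := by rw [← h1, h]
        exact Or.inl (hpxy ▸ hp)
      · simp [h1] at h
    · by_cases h2 : p.2 = x
      · simp only [h2, if_true, List.mem_singleton] at h
        have hpxy : p = (y, x) := by rw [← h2, h]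
        exact Or.inr (hpxy ▸ hp)
      · simp [h2] at h
  · rintro (h | h)
    · exact ⟨(x, y), h, Or.inl (by simp)⟩
    · exact ⟨(y, x), h, Or.inr (by simp)⟩

-- the B state after the edges fold
lemma ufFold_snd (edges : List (Int × Int)) (st : PySem.Dict Int Int × PySem.Dict Int Int) :
    (edges.foldl ufStep st).2 =
      edges.foldl (fun d p => (d.modify p.1 0 (fun v => v + 1)).modify p.2 0 (fun v => v + 1)) st.2 := by
  induction edges generalizing st with
  | nil => rfl
  | cons p ps ih => simp only [List.foldl_cons]; rw [ih]; rfl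

lemma ufFold_fst (edges : List (Int × Int)) (st : PySem.Dict Int Int × PySem.Dict Int Int) :
    (edges.foldl ufStep st).1 = edges.foldl (fun c p =>
      let ra := c.getD p.1 0
      let rb := c.getD p.2 0
      if ra != rb then c.keys.foldl (fun c' n => if c'.getD n 0 == rb then c'.insert n ra else c') c
      else c) st.1 := by
  induction edges generalizing st with
  | nil => rfl
  | cons p ps ih => simp only [List.foldl_cons]; rw [ih]; rfl

-- degree dict = adjacency-list lengths, in lockstep over the same edges
lemma deg_eq_forest_len (edges : List (Int × Int)) :
    ∀ (dd : PySem.Dict Int Int) (fd : PySem.Dict Int (List Int)),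
      (∀ n, dd.getD n 0 = ((fd.getD n []).length : Int)) →
      ∀ n, (edges.foldl (fun d p => (d.modify p.1 0 (fun v => v + 1)).modify p.2 0 (fun v => v + 1)) dd).getD n 0
        = (((edges.foldl (fun d p => (d.modify p.1 [] (fun l => l ++ [p.2])).modify p.2 [] (fun l => l ++ [p.1])) fd).getD n []).length : Int) := by
  induction edges with
  | nil => intro dd fd h n; exact h n
  | cons p ps ih =>
    intro dd fd h n
    simp only [List.foldl_cons]
    refine ih _ _ (fun m => ?_) n
    simp only [PySem.Dict.getD_modify]
    by_cases h2 : m = p.2 <;> by_cases h1 : m = p.1 <;> by_cases h12 : p.1 = p.2 <;>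
      simp [h1, h2, h12, h, eq_comm, List.length_append] <;> push_cast <;> omega

lemma deg0_getD (nodes : List Int) (x : Int) :
    ∀ d : PySem.Dict Int Int, (∀ y, d.getD y 0 = 0) →
      ((nodes.foldl (fun d n => d.insert n (0 : Int)) d).getD x 0) = 0 := by
  induction nodes with
  | nil => intro d h; exact h x
  | cons n ns ih =>
    intro d h
    simp only [List.foldl_cons]
    exact ih _ (fun y => by rw [PySem.Dict.getD_insert]; split <;> simp [h y])

lemma flag_eq (nodes : List Int) (edges : List (Int × Int)) (n : Int) :
    flagB (edges.foldl ufStep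
        (nodes.foldl (fun d n => d.insert n n) PySem.Dict.empty,
         nodes.foldl (fun d n => d.insert n (0 : Int)) PySem.Dict.empty)).2 n
      = flagA (forestA nodes edges) n := by
  have hsnd := ufFold_snd edges
    (nodes.foldl (fun d n => d.insert n n) PySem.Dict.empty,
     nodes.foldl (fun d n => d.insert n (0 : Int)) PySem.Dict.empty)
  have hdeg : (edges.foldl ufStep
      (nodes.foldl (fun d n => d.insert n n) PySem.Dict.empty,
       nodes.foldl (fun d n => d.insert n (0 : Int)) PySem.Dict.empty)).2.getD n 0
      = (((forestA nodes edges).getD n []).length : Int) := by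
    rw [hsnd]
    unfold forestA
    exact deg_eq_forest_len edges _ _
      (fun m => by
        rw [deg0_getD nodes m PySem.Dict.empty (fun y => by simp [PySem.Dict.getD_empty]),
            forestA_base_getD nodes m PySem.Dict.empty (fun y => by simp [PySem.Dict.getD_empty])]
        simp) n
  unfold flagA flagB
  rw [hdeg]
  have h1 : PySem.Int.band n 1 = PySem.Int.mod n 2 := PySem.Int.band_one n
  set L := ((forestA nodes edges).getD n []).length with hL
  have h2 : PySem.Int.band (L : Int) 1 = ((L % 2 : Nat) : Int) := by
    rw [PySem.Int.band_one]
    exact_mod_cast PySem.Int.mod_natCast L 2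
  have h3 : L &&& 1 = L % 2 := Nat.and_one_is_mod L
  have h4 : PySem.Int.mod n 2 = 0 ∨ PySem.Int.mod n 2 = 1 := by
    have := PySem.Int.mod_nonneg n (b := 2) (by norm_num)
    have := PySem.Int.mod_lt n (b := 2) (by norm_num)
    omega
  have h5 : L % 2 = 0 ∨ L % 2 = 1 := by omega
  have h4' : n % 2 = PySem.Int.mod n 2 :=
    (PySem.Int.mod_eq_emod_of_pos (a := n) (b := 2) (by norm_num)).symm
  rcases h4 with h4 | h4 <;> rcases h5 with h5 | h5 <;>
    rw [h1, h2, h3, h4, h5] <;> decide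

-- ===== comp characterization =====

lemma comp0_getD (nodes : List Int) (x : Int) :
    ∀ d : PySem.Dict Int Int,
      ((nodes.foldl (fun d n => d.insert n n) d).getD x 0)
        = if x ∈ nodes then x else d.getD x 0 := by
  induction nodes with
  | nil => intro d; simp
  | cons n ns ih =>
    intro d
    simp only [List.foldl_cons, ih, List.mem_cons]
    rw [PySem.Dict.getD_insert]
    by_cases hx : x ∈ ns <;> by_cases hn : x = n <;> simp [hx, hn]

lemma comp0_keys (nodes : List Int) :
    (nodes.foldl (fun d n => d.insert n n) PySem.Dict.empty).keys = PySem.Set.ofList nodes := by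
  rw [PySem.Dict.keys_foldl_insert]
  simp [PySem.Set.update, PySem.Set.ofList_eq_foldl, PySem.Dict.keys_empty]

lemma relabel_keys (ra rb : Int) :
    ∀ (l : List Int) (c : PySem.Dict Int Int), (∀ n ∈ l, c.contains n = true) →
      (l.foldl (fun c' n => if c'.getD n 0 == rb then c'.insert n ra else c') c).keys = c.keys := by
  intro l
  induction l with
  | nil => intro c _; rfl
  | cons n ns ih =>
    intro c h
    simp only [List.foldl_cons]
    have hc := h n (by simp)
    have hkeys : (if c.getD n 0 == rb then c.insert n ra else c).keys = c.keys := by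
      split
      · exact PySem.Dict.keys_insert_of_contains c ra hc
      · rfl
    rw [ih _ (fun m hm => ?_), hkeys]
    split
    · rw [PySem.Dict.contains_insert]; simp [h m (by simp [hm])]
    · exact h m (by simp [hm])

lemma relabel_getD (ra rb x : Int) :
    ∀ (l : List Int) (c : PySem.Dict Int Int), l.Nodup →
      (l.foldl (fun c' n => if c'.getD n 0 == rb then c'.insert n ra else c') c).getD x 0
        = if x ∈ l ∧ c.getD x 0 = rb then ra else c.getD x 0 := by
  intro l
  induction l with
  | nil => intro c _; simp
  | cons n ns ih =>
    intro c hnd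
    simp only [List.foldl_cons]
    rw [ih _ hnd.of_cons]
    have hnn : n ∉ ns := (List.nodup_cons.mp hnd).1
    by_cases hx : x = n
    · subst hx
      split
      · next h => simp only [beq_iff_eq] at h
                  simp [PySem.Dict.getD_insert, hnn, h]
      · next h => simp only [beq_iff_eq] at h
                  simp [hnn, h]
    · have hgd : (if c.getD n 0 == rb then c.insert n ra else c).getD x 0 = c.getD x 0 := by
        split
        · rw [PySem.Dict.getD_insert]; simp [hx]
        · rfl
      rw [hgd]
      simp [List.mem_cons, hx]

-- invariant for the union-find fold
def CompInv (nodes : List Int) (E : List (Int × Int)) (c : PySem.Dict Int Int) : Prop :=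
  c.keys = PySem.Set.ofList nodes ∧
  ∀ x ∈ nodes, ∀ y ∈ nodes, (c.getD x 0 = c.getD y 0 ↔ Reach E x y)

lemma compInv_step (nodes : List Int) (E : List (Int × Int)) (c : PySem.Dict Int Int)
    (p : Int × Int) (hp1 : p.1 ∈ nodes) (hp2 : p.2 ∈ nodes) (h : CompInv nodes E c) :
    CompInv nodes (E ++ [p])
      (let ra := c.getD p.1 0
       let rb := c.getD p.2 0
       if ra != rb then c.keys.foldl (fun c' n => if c'.getD n 0 == rb then c'.insert n ra else c') c
       else c) := by
  obtain ⟨hkeys, hiff⟩ := h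
  have hknd : c.keys.Nodup := hkeys ▸ PySem.Set.nodup_ofList nodes
  have hmemk : ∀ x ∈ nodes, x ∈ c.keys := fun x hx =>
    hkeys ▸ (PySem.Set.mem_ofList nodes x).mpr hx
  have hpeta : ((p.1, p.2) : Int × Int) = p := rfl
  by_cases hab : c.getD p.1 0 = c.getD p.2 0
  · simp only [bne_iff_ne, ne_eq, hab, not_true_eq_false, if_false]
    refine ⟨hkeys, fun x hx y hy => ?_⟩
    have hRab : Reach E p.1 p.2 := (hiff _ hp1 _ hp2).mp hab
    rw [show E ++ [p] = E ++ [(p.1, p.2)] from by rw [hpeta]]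
    rw [reach_append]
    constructor
    · intro hxy; exact Or.inl ((hiff _ hx _ hy).mp hxy)
    · rintro (h | ⟨h1, h2⟩ | ⟨h1, h2⟩)
      · exact (hiff _ hx _ hy).mpr h
      · exact (hiff _ hx _ hy).mpr (h1.trans (hRab.trans h2))
      · exact (hiff _ hx _ hy).mpr (h1.trans ((reach_symm E hRab).trans h2))
  · simp only [bne_iff_ne, ne_eq, hab, not_false_eq_true, if_true]
    have hget : ∀ x, (c.keys.foldl (fun c' n =>
        if c'.getD n 0 == c.getD p.2 0 then c'.insert n (c.getD p.1 0) else c') c).getD x 0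
        = if x ∈ c.keys ∧ c.getD x 0 = c.getD p.2 0 then c.getD p.1 0 else c.getD x 0 :=
      fun x => relabel_getD _ _ x c.keys c hknd
    refine ⟨?_, fun x hx y hy => ?_⟩
    · rw [relabel_keys _ _ c.keys c
        (fun n hn => (PySem.Dict.contains_iff_mem_keys c n).mpr hn)]
      exact hkeys
    · rw [hget x, hget y]
      simp only [hmemk x hx, hmemk y hy, true_and]
      rw [show E ++ [p] = E ++ [(p.1, p.2)] from by rw [hpeta]]
      rw [reach_append]
      have hx1 : c.getD x 0 = c.getD p.1 0 ↔ Reach E x p.1 := hiff _ hx _ hp1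
      have hx2 : c.getD x 0 = c.getD p.2 0 ↔ Reach E x p.2 := hiff _ hx _ hp2
      have hy1 : c.getD y 0 = c.getD p.1 0 ↔ Reach E y p.1 := hiff _ hy _ hp1
      have hy2 : c.getD y 0 = c.getD p.2 0 ↔ Reach E y p.2 := hiff _ hy _ hp2
      have hxy : c.getD x 0 = c.getD y 0 ↔ Reach E x y := hiff _ hx _ hy
      by_cases hxrb : c.getD x 0 = c.getD p.2 0
      · by_cases hyrb : c.getD y 0 = c.getD p.2 0
        · rw [if_pos hxrb, if_pos hyrb]
          exact iff_of_true rfl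
            (Or.inl ((hx2.mp hxrb).trans (reach_symm E (hy2.mp hyrb))))
        · rw [if_pos hxrb, if_neg hyrb]
          constructor
          · intro hh
            exact Or.inr (Or.inr ⟨hx2.mp hxrb, reach_symm E (hy1.mp hh.symm)⟩)
          · rintro (h | ⟨h1, h2⟩ | ⟨h1, h2⟩)
            · exact absurd (hy2.mpr ((reach_symm E h).trans (hx2.mp hxrb))) hyrb
            · exact absurd (hy2.mpr (reach_symm E h2)) hyrb
            · exact (hy1.mpr (reach_symm E h2)).symm
      · by_cases hyrb : c.getD y 0 = c.getD p.2 0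
        · rw [if_neg hxrb, if_pos hyrb]
          constructor
          · intro hh
            exact Or.inr (Or.inl ⟨hx1.mp hh, reach_symm E (hy2.mp hyrb)⟩)
          · rintro (h | ⟨h1, h2⟩ | ⟨h1, h2⟩)
            · exact absurd (hx2.mpr (h.trans (hy2.mp hyrb))) hxrb
            · exact hx1.mpr h1
            · exact absurd (hx2.mpr h1) hxrb
        · rw [if_neg hxrb, if_neg hyrb]
          constructor
          · intro hh; exact Or.inl (hxy.mp hh)
          · rintro (h | ⟨h1, h2⟩ | ⟨h1, h2⟩)
            · exact hxy.mpr h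
            · exact absurd (hy2.mpr (reach_symm E h2)) hyrb
            · exact absurd (hx2.mpr h1) hxrb

lemma compInv_fold (nodes : List Int) :
    ∀ (rest done : List (Int × Int)) (c : PySem.Dict Int Int),
      (∀ p ∈ rest, p.1 ∈ nodes ∧ p.2 ∈ nodes) → CompInv nodes done c →
      CompInv nodes (done ++ rest) (rest.foldl (fun c p =>
        let ra := c.getD p.1 0
        let rb := c.getD p.2 0
        if ra != rb then c.keys.foldl (fun c' n => if c'.getD n 0 == rb then c'.insert n ra else c') c
        else c) c) := by
  intro rest
  induction rest with
  | nil => intro done c _ h; simpa using h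
  | cons p ps ih =>
    intro done c hpre h
    simp only [List.foldl_cons]
    have hstep := compInv_step nodes done c p (hpre p (by simp)).1 (hpre p (by simp)).2 h
    have := ih (done ++ [p]) _ (fun q hq => hpre q (by simp [hq])) hstep
    simpa [List.append_assoc] using this

lemma compD_spec (nodes : List Int) (edges : List (Int × Int)) (hpre : Pre_solution nodes edges) :
    CompInv nodes edges (edges.foldl ufStep
      (nodes.foldl (fun d n => d.insert n n) PySem.Dict.empty,
       nodes.foldl (fun d n => d.insert n (0 : Int)) PySem.Dict.empty)).1 := by
  rw [ufFold_fst]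
  have hbase : CompInv nodes []
      (nodes.foldl (fun d n => d.insert n n) PySem.Dict.empty) := by
    refine ⟨comp0_keys nodes, fun x hx y hy => ?_⟩
    rw [comp0_getD nodes x PySem.Dict.empty, comp0_getD nodes y PySem.Dict.empty]
    simp only [hx, hy, if_true]
    have hempty : Reach [] x y ↔ x = y := by
      constructor
      · intro h
        induction h with
        | refl => rfl
        | tail _ e _ => rcases e with e | e <;> simp at e
      · rintro rfl; exact Relation.ReflTransGen.refl
    rw [hempty]
  have := compInv_fold nodes edges [] _ hpre hbase
  simpa using this

-- ===== DFS =====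

lemma dfsInner_spec (ns : List Int) :
    ∀ (st0 : List Int) (inc : PySem.Set Int),
      ∃ add : List Int, dfsInner st0 inc ns = (st0 ++ add, inc ++ add) ∧ add.Nodup ∧
        (∀ z ∈ add, z ∈ ns ∧ z ∉ inc) ∧ (∀ z ∈ ns, z ∈ inc ∨ z ∈ add) := by
  induction ns with
  | nil => intro st0 inc; exact ⟨[], by simp [dfsInner], List.nodup_nil, by simp, by simp⟩
  | cons n ns ih =>
    intro st0 inc
    by_cases hn : n ∈ inc
    · obtain ⟨add, heq, hnd, hprop, hcov⟩ := ih st0 inc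
      refine ⟨add, ?_, hnd, fun z hz => ⟨by simp [(hprop z hz).1], (hprop z hz).2⟩,
              fun z hz => ?_⟩
      · unfold dfsInner at heq ⊢
        simp only [List.foldl_cons]
        rw [if_pos (by rw [PySem.Set.contains_iff]; exact hn)]
        exact heq
      · rcases List.mem_cons.mp hz with h | h
        · exact Or.inl (h ▸ hn)
        · exact hcov z h
    · obtain ⟨add, heq, hnd, hprop, hcov⟩ := ih (st0 ++ [n]) (inc ++ [n])
      have hadd : PySem.Set.add inc n = inc ++ [n] := PySem.Set.add_of_not_mem hn
      refine ⟨n :: add, ?_, ?_, ?_, ?_⟩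
      · unfold dfsInner at heq ⊢
        simp only [List.foldl_cons]
        rw [if_neg (by simp only [PySem.Set.contains_iff]; exact hn)]
        simp only [hadd, heq, List.append_assoc, List.singleton_append]
      · exact List.nodup_cons.mpr ⟨fun h => (hprop n h).2 (by simp), hnd⟩
      · intro z hz
        rcases List.mem_cons.mp hz with h | h
        · exact ⟨by simp [h], h ▸ hn⟩
        · have hp := hprop z h
          exact ⟨by simp [hp.1], fun hz2 => hp.2 (by simp [hz2])⟩
      · intro z hz
        rcases List.mem_cons.mp hz with h | h
        · exact Or.inr (by simp [h])
        · rcases hcov z h with h2 | h2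
          · rcases List.mem_append.mp h2 with h3 | h3
            · exact Or.inl h3
            · exact Or.inr (by simp at h3; simp [h3])
          · exact Or.inr (by simp [h2])

def remainingN (nodes : List Int) (inc : List Int) : Nat :=
  (PySem.Set.ofList nodes).countP (fun z => decide (z ∉ inc))

lemma countP_drop_one (z : Int) (p q : Int → Bool)
    (hpq : ∀ w, w ≠ z → p w = q w) (hpz : p z = true) (hqz : q z = false) :
    ∀ l : List Int, l.Nodup → z ∈ l → l.countP p = l.countP q + 1 := by
  intro l
  induction l with
  | nil => intro _ hz; simp at hz
  | cons a l ih =>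
    intro hl hz
    rcases List.mem_cons.mp hz with h | h
    · have hnl : a ∉ l := (List.nodup_cons.mp hl).1
      have hpa : p a = true := by rw [← h]; exact hpz
      have hqa : q a = false := by rw [← h]; exact hqz
      have hc : l.countP p = l.countP q := by
        apply List.countP_congr
        intro w hw
        rw [hpq w (fun hwz => hnl (h ▸ hwz ▸ hw))]
      simp [List.countP_cons, hpa, hqa, hc]
    · have ha : p a = q a := by
        by_cases haz : a = z
        · subst haz; exact absurd h (List.nodup_cons.mp hl).1
        · exact hpq a haz
      have hi := ih (List.nodup_cons.mp hl).2 h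
      simp only [List.countP_cons, ha, hi]
      omega

lemma remaining_append (nodes : List Int) :
    ∀ (add inc : List Int), add.Nodup → (∀ z ∈ add, z ∈ nodes) → (∀ z ∈ add, z ∉ inc) →
      remainingN nodes (inc ++ add) + add.length = remainingN nodes inc := by
  intro add
  induction add with
  | nil => intro inc _ _ _; simp [remainingN]
  | cons z zs ih =>
    intro inc hnd hsub hdis
    have h1 : remainingN nodes (inc ++ [z]) + 1 = remainingN nodes inc := by
      unfold remainingN
      rw [countP_drop_one z (fun w => decide (w ∉ inc)) (fun w => decide (w ∉ inc ++ [z]))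
            (fun w hw => by simp [hw]) (by simp [hdis z (by simp)]) (by simp)
            (PySem.Set.ofList nodes) (PySem.Set.nodup_ofList nodes)
            ((PySem.Set.mem_ofList nodes z).mpr (hsub z (by simp)))]
    have h2 := ih (inc ++ [z]) hnd.of_cons (fun w hw => hsub w (by simp [hw]))
      (fun w hw => by
        simp only [List.mem_append, List.mem_singleton]
        push_neg
        exact ⟨hdis w (by simp [hw]), fun hwz => (List.nodup_cons.mp hnd).1 (hwz ▸ hw)⟩)
    simp only [List.append_assoc, List.singleton_append] at h2 ⊢
    simp only [List.length_cons]
    omega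

lemma remaining_le (nodes inc : List Int) : remainingN nodes inc ≤ nodes.length := by
  unfold remainingN
  calc (PySem.Set.ofList nodes).countP _ ≤ (PySem.Set.ofList nodes).length := List.countP_le_length
    _ ≤ nodes.length := by
        rw [PySem.Set.ofList_eq_foldl]
        have hgen : ∀ (xs : List Int) (s : List Int), (xs.foldl PySem.Set.add s).length ≤ s.length + xs.length := by
          intro xs
          induction xs with
          | nil => simp
          | cons a l ih =>
            intro s
            calc (l.foldl PySem.Set.add (PySem.Set.add s a)).length
                ≤ (PySem.Set.add s a).length + l.length := ih _
              _ ≤ s.length + (a :: l).length := by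
                  rw [PySem.Set.add_eq_ite]
                  split <;> simp <;> omega
        simpa using hgen nodes []

-- the master DFS lemma
lemma dfsA_run (nodes : List Int) (edges : List (Int × Int)) (hpre : Pre_solution nodes edges)
    (inc0 : List Int) (s : Int) :
    ∀ (fuel : Nat) (searches inc tree : List Int),
      remainingN nodes inc + searches.length < fuel →
      inc.Nodup →
      (∀ z, z ∈ inc ↔ z ∈ inc0 ∨ z ∈ tree ∨ z ∈ searches) →
      (tree ++ searches).Nodup →
      (∀ z ∈ tree ++ searches, z ∉ inc0) →
      (∀ z ∈ tree ++ searches, Reach edges s z) →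
      (∀ x ∈ tree, ∀ n, ERel edges x n → n ∈ inc) →
      (∀ z ∈ tree ++ searches, z ∈ nodes ∨ z = s) →
      (let r := dfsA (forestA nodes edges) fuel searches inc tree
       (∀ z, z ∈ r.2 ↔ z ∈ inc0 ∨ z ∈ r.1) ∧ r.1.Nodup ∧ r.2.Nodup ∧
       (∀ z ∈ r.1, z ∉ inc0) ∧ (∀ z ∈ r.1, Reach edges s z) ∧
       (∀ x ∈ r.1, ∀ n, ERel edges x n → n ∈ r.2) ∧
       (∀ z ∈ r.1, z ∈ nodes ∨ z = s) ∧ (∀ z ∈ tree ++ searches, z ∈ r.1)) := by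
  intro fuel
  induction fuel with
  | zero => intro searches inc tree hfuel; omega
  | succ fuel ih =>
    intro searches inc tree hfuel hincnd hmem hnd hdisj hreach hclosed hnode
    rcases hlast : searches.getLast? with _ | x
    · have hse : searches = [] := List.getLast?_eq_none_iff.mp hlast
      subst hse
      simp only [dfsA, hlast]
      refine ⟨fun z => ?_, ?_, hincnd, ?_, ?_, hclosed, ?_, ?_⟩
      · rw [hmem z]; simp
      · simpa using hnd
      · intro z hz; exact hdisj z (by simpa using hz)
      · intro z hz; exact hreach z (by simpa using hz)
      · intro z hz; exact hnode z (by simpa using hz)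
      · intro z hz; simpa using hz
    · have hsplit : searches.dropLast ++ [x] = searches :=
        List.dropLast_append_getLast? x (by simp [hlast])
      obtain ⟨add, heq, haddnd, hprop, hcov⟩ :=
        dfsInner_spec ((forestA nodes edges).getD x []) searches.dropLast inc
      have hxs : x ∈ searches := by rw [← hsplit]; simp
      have hxts : x ∈ tree ++ searches := by simp [hxs]
      have hsmem : ∀ z, z ∈ searches ↔ z ∈ searches.dropLast ∨ z = x := by
        intro z; rw [← hsplit]; simp
      have haddrel : ∀ z ∈ add, ERel edges x z := fun z hz =>
        (mem_forestA nodes edges x z).mp (hprop z hz).1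
      have haddnodes : ∀ z ∈ add, z ∈ nodes := fun z hz =>
        (erel_mem_nodes hpre (haddrel z hz)).2
      have hincsub : ∀ z, z ∈ inc0 ∨ z ∈ tree ∨ z ∈ searches → z ∈ inc := fun z hz =>
        (hmem z).mpr hz
      have hadddisj : ∀ z ∈ add, z ∉ inc := fun z hz => (hprop z hz).2
      have hrem := remaining_append nodes add inc haddnd haddnodes hadddisj
      have hlen : searches.length = searches.dropLast.length + 1 := by
        rw [← hsplit]; simp
      -- the one-step unfolding
      simp only [dfsA, hlast, heq]
      -- invariants for the recursive call
      have hmem' : ∀ z, z ∈ inc ++ add ↔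
          z ∈ inc0 ∨ z ∈ tree ++ [x] ∨ z ∈ searches.dropLast ++ add := by
        intro z
        simp only [List.mem_append, List.mem_singleton, hmem z, hsmem z]
        tauto
      have htsub : ∀ z ∈ tree ++ searches, z ∈ inc :=
        fun z hz => hincsub z (by
          rcases List.mem_append.mp hz with h | h
          · exact Or.inr (Or.inl h)
          · exact Or.inr (Or.inr h))
      have hndA : (tree ++ [x] ++ searches.dropLast).Nodup := by
        have hsp : searches.Perm ([x] ++ searches.dropLast) := by
          conv_lhs => rw [← hsplit]
          exact List.perm_append_comm
        have hperm : (tree ++ searches).Perm (tree ++ ([x] ++ searches.dropLast)) :=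
          List.Perm.append_left tree hsp
        have := hperm.nodup hnd
        simpa [List.append_assoc] using this
      have hnd' : (tree ++ [x] ++ (searches.dropLast ++ add)).Nodup := by
        have hA : ((tree ++ [x] ++ searches.dropLast) ++ add).Nodup := by
          rw [List.nodup_append]
          refine ⟨hndA, haddnd, ?_⟩
          intro a ha b hb heq
          subst heq
          exact hadddisj a hb (htsub a (by
            rcases List.mem_append.mp ha with h | h
            · rcases List.mem_append.mp h with h2 | h2
              · exact List.mem_append.mpr (Or.inl h2)
              · exact List.mem_append.mpr
                  (Or.inr ((hsmem a).mpr (Or.inr (by simpa using h2))))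
            · exact List.mem_append.mpr (Or.inr ((hsmem a).mpr (Or.inl h)))))
        simpa [List.append_assoc] using hA
      have hdisj' : ∀ z ∈ tree ++ [x] ++ (searches.dropLast ++ add), z ∉ inc0 := by
        intro z hz
        simp only [List.mem_append, List.mem_singleton] at hz
        rcases hz with (hz | hz) | (hz | hz)
        · exact hdisj z (by simp [hz])
        · subst hz; exact hdisj z hxts
        · exact hdisj z (by
            simp only [List.mem_append]
            exact Or.inr ((hsmem z).mpr (Or.inl hz)))
        · intro h0
          exact hadddisj z hz (hincsub z (Or.inl h0))
      have hreach' : ∀ z ∈ tree ++ [x] ++ (searches.dropLast ++ add), Reach edges s z := by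
        intro z hz
        simp only [List.mem_append, List.mem_singleton] at hz
        rcases hz with (hz | hz) | (hz | hz)
        · exact hreach z (by simp [hz])
        · subst hz; exact hreach z hxts
        · exact hreach z (by
            simp only [List.mem_append]
            exact Or.inr ((hsmem z).mpr (Or.inl hz)))
        · exact (hreach x hxts).tail (haddrel z hz)
      have hclosed' : ∀ x' ∈ tree ++ [x], ∀ n, ERel edges x' n → n ∈ inc ++ add := by
        intro x' hx' n hn
        rcases List.mem_append.mp hx' with h | h
        · exact List.mem_append.mpr (Or.inl (hclosed x' h n hn))
        · simp only [List.mem_singleton] at h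
          subst h
          have hnmem : n ∈ (forestA nodes edges).getD x' [] :=
            (mem_forestA nodes edges x' n).mpr hn
          rcases hcov n hnmem with h2 | h2
          · exact List.mem_append.mpr (Or.inl h2)
          · exact List.mem_append.mpr (Or.inr h2)
      have hnode' : ∀ z ∈ tree ++ [x] ++ (searches.dropLast ++ add), z ∈ nodes ∨ z = s := by
        intro z hz
        simp only [List.mem_append, List.mem_singleton] at hz
        rcases hz with (hz | hz) | (hz | hz)
        · exact hnode z (by simp [hz])
        · subst hz; exact hnode z hxts
        · exact hnode z (by
            simp only [List.mem_append]
            exact Or.inr ((hsmem z).mpr (Or.inl hz)))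
        · exact Or.inl (haddnodes z hz)
      have hincnd' : (inc ++ add).Nodup := by
        rw [List.nodup_append]
        refine ⟨hincnd, haddnd, ?_⟩
        intro a ha b hb heq
        subst heq
        exact hadddisj a hb ha
      have hfuel' : remainingN nodes (inc ++ add) + (searches.dropLast ++ add).length < fuel := by
        have := List.length_append (as := searches.dropLast) (bs := add)
        omega
      have hmain := ih (searches.dropLast ++ add) (inc ++ add) (tree ++ [x]) hfuel'
        hincnd' hmem' hnd' hdisj' hreach' hclosed' hnode'
      obtain ⟨c1, c2, c3, c4, c5, c6, c7, c8⟩ := hmain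
      refine ⟨c1, c2, c3, c4, c5, c6, c7, ?_⟩
      intro z hz
      rcases List.mem_append.mp hz with h | h
      · exact c8 z (by simp [h])
      · rcases (hsmem z).mp h with h2 | h2
        · exact c8 z (by simp [h2])
        · subst h2; exact c8 z (by simp)

lemma dfsA_component (nodes : List Int) (edges : List (Int × Int)) (hpre : Pre_solution nodes edges)
    (inc0 : List Int) (s : Int) (hs : s ∈ nodes) (hs0 : s ∉ inc0) (hnd : inc0.Nodup)
    (hclosed : ∀ x ∈ inc0, ∀ n, ERel edges x n → n ∈ inc0) :
    (let r := dfsA (forestA nodes edges) (nodes.length + 1) [s] (PySem.Set.add inc0 s) []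
     (∀ z, z ∈ r.1 ↔ Reach edges s z) ∧ r.1.Nodup ∧ (∀ z ∈ r.1, z ∉ inc0) ∧
     (∀ z, z ∈ r.2 ↔ z ∈ inc0 ∨ z ∈ r.1) ∧ r.2.Nodup ∧
     (∀ x ∈ r.2, ∀ n, ERel edges x n → n ∈ r.2)) := by
  have hadd : PySem.Set.add inc0 s = inc0 ++ [s] := PySem.Set.add_of_not_mem hs0
  have hrem1 : remainingN nodes (inc0 ++ [s]) + 1 = remainingN nodes inc0 :=
    remaining_append nodes [s] inc0 (by simp) (by simpa using hs) (by simpa using hs0)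
  have hlen : 1 ≤ nodes.length := by
    cases nodes with
    | nil => simp at hs
    | cons a l => simp
  have hrle := remaining_le nodes inc0
  have hfuel : remainingN nodes (inc0 ++ [s]) + ([s] : List Int).length < nodes.length + 1 := by
    have h1 : ([s] : List Int).length = 1 := rfl
    omega
  have hrun := dfsA_run nodes edges hpre inc0 s (nodes.length + 1) [s] (inc0 ++ [s]) []
    hfuel
    (by rw [List.nodup_append]
        refine ⟨hnd, by simp, ?_⟩
        intro a ha b hb heq
        simp only [List.mem_singleton] at hb
        exact hs0 (hb ▸ heq ▸ ha))
    (fun z => by simp [or_comm])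
    (by simp)
    (fun z hz => by simp only [List.nil_append, List.mem_singleton] at hz; exact hz ▸ hs0)
    (fun z hz => by
      simp only [List.nil_append, List.mem_singleton] at hz
      exact hz ▸ Relation.ReflTransGen.refl)
    (fun x hx => by simp at hx)
    (fun z hz => by simp only [List.nil_append, List.mem_singleton] at hz; exact Or.inl (hz ▸ hs))
  rw [hadd]
  obtain ⟨c1, c2, c3, c4, c5, c6, c7, c8⟩ := hrun
  have hs_tree : s ∈ (dfsA (forestA nodes edges) (nodes.length + 1) [s] (inc0 ++ [s]) []).1 :=
    c8 s (by simp)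
  refine ⟨fun z => ⟨fun hz => c5 z hz, fun hz => ?_⟩, c2, c4, c1, c3, ?_⟩
  · -- completeness: every node reachable from s is in the tree
    induction hz with
    | refl => exact hs_tree
    | @tail u w hsu e ihz =>
      have hu : u ∈ (dfsA (forestA nodes edges) (nodes.length + 1) [s] (inc0 ++ [s]) []).1 := ihz
      have hw : w ∈ (dfsA (forestA nodes edges) (nodes.length + 1) [s] (inc0 ++ [s]) []).2 :=
        c6 u hu w e
      rcases (c1 w).mp hw with h0 | h0
      · exfalso
        exact c4 u hu (hclosed w h0 u (erel_symm edges e))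
      · exact h0
  · intro x hx n hn
    rcases (c1 x).mp hx with h0 | h0
    · exact (c1 n).mpr (Or.inl (hclosed x h0 n hn))
    · exact c6 x h0 n hn

-- outer loop invariant
def OInv (nodes : List Int) (edges : List (Int × Int))
    (st : List (List Int) × PySem.Set Int) : Prop :=
  (∀ z, z ∈ st.2 ↔ ∃ t ∈ st.1, z ∈ t) ∧ st.2.Nodup ∧
  (∀ t ∈ st.1, t.Nodup) ∧
  (∀ t ∈ st.1, ∃ s, s ∈ nodes ∧ ∀ z, z ∈ t ↔ Reach edges s z) ∧
  (∀ x ∈ st.2, ∀ n, ERel edges x n → n ∈ st.2) ∧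
  List.Pairwise (fun t u => ∀ z ∈ t, z ∉ u) st.1

lemma outer_fold (nodes : List Int) (edges : List (Int × Int)) (hpre : Pre_solution nodes edges) :
    ∀ (rest : List Int) (st : List (List Int) × PySem.Set Int),
      (∀ z ∈ rest, z ∈ nodes) → OInv nodes edges st →
      (let r := rest.foldl (fun st node =>
          if PySem.Set.contains st.2 node then st
          else
            let r := dfsA (forestA nodes edges) (nodes.length + 1) [node] (PySem.Set.add st.2 node) []
            (st.1 ++ [r.1], r.2)) st
       OInv nodes edges r ∧ (∀ z ∈ rest, z ∈ r.2) ∧ (∀ z ∈ st.2, z ∈ r.2)) := by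
  intro rest
  induction rest with
  | nil => intro st _ h; exact ⟨h, by simp, fun z hz => hz⟩
  | cons nd rest ih =>
    intro st hrest hOI
    obtain ⟨o1, o2, o3, o4, o5, o6⟩ := hOI
    simp only [List.foldl_cons]
    by_cases hc : PySem.Set.contains st.2 nd = true
    · rw [if_pos hc]
      have := ih st (fun z hz => hrest z (by simp [hz])) ⟨o1, o2, o3, o4, o5, o6⟩
      obtain ⟨hOI', hcov', hmono'⟩ := this
      exact ⟨hOI', fun z hz => by
        rcases List.mem_cons.mp hz with h | h
        · exact hmono' z (h ▸ (PySem.Set.contains_iff st.2 nd).mp hc)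
        · exact hcov' z h, hmono'⟩
    · rw [if_neg hc]
      have hnd_mem : nd ∈ nodes := hrest nd (by simp)
      have hnd_notin : nd ∉ st.2 := fun h => hc ((PySem.Set.contains_iff st.2 nd).mpr h)
      have hcomp := dfsA_component nodes edges hpre st.2 nd hnd_mem hnd_notin o2
        (fun x hx n hn => o5 x hx n hn)
      obtain ⟨c1, c2, c3, c4, c5, c6⟩ := hcomp
      set r := dfsA (forestA nodes edges) (nodes.length + 1) [nd] (PySem.Set.add st.2 nd) []
        with hr
      have hOI' : OInv nodes edges (st.1 ++ [r.1], r.2) := by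
        refine ⟨?_, c5, ?_, ?_, c6, ?_⟩
        · intro z
          rw [c4 z, o1 z]
          simp only [List.mem_append, List.mem_singleton]
          constructor
          · rintro (⟨t, ht, hz⟩ | hz)
            · exact ⟨t, Or.inl ht, hz⟩
            · exact ⟨r.1, Or.inr rfl, hz⟩
          · rintro ⟨t, ht | ht, hz⟩
            · exact Or.inl ⟨t, ht, hz⟩
            · exact Or.inr (ht ▸ hz)
        · intro t ht
          rcases List.mem_append.mp ht with h | h
          · exact o3 t h
          · simp only [List.mem_singleton] at h; exact h ▸ c2
        · intro t ht
          rcases List.mem_append.mp ht with h | h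
          · exact o4 t h
          · simp only [List.mem_singleton] at h
            exact ⟨nd, hnd_mem, h ▸ c1⟩
        · rw [List.pairwise_append]
          refine ⟨o6, by simp, ?_⟩
          intro t ht u hu z hzt
          simp only [List.mem_singleton] at hu
          subst hu
          intro hzr
          exact c3 z hzr ((o1 z).mpr ⟨t, ht, hzt⟩)
      have hstep := ih (st.1 ++ [r.1], r.2) (fun z hz => hrest z (by simp [hz])) hOI'
      obtain ⟨hOI'', hcov'', hmono''⟩ := hstep
      refine ⟨hOI'', fun z hz => ?_, fun z hz => ?_⟩
      · rcases List.mem_cons.mp hz with h | h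
        · subst h
          exact hmono'' z ((c4 z).mpr (Or.inr ((c1 z).mpr Relation.ReflTransGen.refl)))
        · exact hcov'' z h
      · exact hmono'' z ((c4 z).mpr (Or.inl hz))

-- ===== counting =====

lemma treeCount_eq (forest : PySem.Dict Int (List Int)) (t : List Int) :
    treeCount forest t =
      ((t.countP (fun z => !flagA forest z) : Int), (t.countP (flagA forest) : Int)) := by
  unfold treeCount
  have hgen : ∀ (t : List Int) (acc : Int × Int),
      t.foldl (fun p node => if flagA forest node then (p.1, p.2 + 1) else (p.1 + 1, p.2)) acc
        = (acc.1 + (t.countP (fun z => !flagA forest z) : Int),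
           acc.2 + (t.countP (flagA forest) : Int)) := by
    intro t
    induction t with
    | nil => intro acc; simp
    | cons a l ih =>
      intro acc
      simp only [List.foldl_cons, ih, List.countP_cons]
      by_cases h : flagA forest a = true <;> simp [h] <;> push_cast <;> ring_nf <;>
        constructor <;> ring
  rw [hgen]; simp

lemma pair_fold_sum {α : Type} (f g : α → Int) (l : List α) :
    ∀ acc : Int × Int,
      l.foldl (fun (r : Int × Int) x => (r.1 + f x, r.2 + g x)) acc
        = (acc.1 + (l.map f).sum, acc.2 + (l.map g).sum) := by
  induction l with
  | nil => intro acc; simp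
  | cons a l ih =>
    intro acc
    simp only [List.foldl_cons, ih, List.map_cons, List.sum_cons, Prod.mk.injEq]
    constructor <;> ring

lemma bucketStep_getD (comp deg : PySem.Dict Int Int)
    (bk : PySem.Dict Int (Int × Int × Int)) (n ℓ : Int) :
    (bucketStep comp deg bk n).getD ℓ (0, 0, 0)
      = if comp.getD n 0 = ℓ then
          (let t := bk.getD ℓ (0, 0, 0)
           if flagB deg n then (t.1 + 1, t.2.1, t.2.2 + 1) else (t.1 + 1, t.2.1 + 1, t.2.2))
        else bk.getD ℓ (0, 0, 0) := by
  by_cases hr : comp.getD n 0 = ℓ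
  · subst hr
    simp only [bucketStep, PySem.Dict.getD_insert, if_pos rfl]
    by_cases hc : bk.contains (comp.getD n 0) = true
    · simp [hc]
    · simp [hc, PySem.Dict.getD_insert,
        PySem.Dict.getD_of_not_contains bk ((0,0,0) : Int × Int × Int) (by simpa using hc)]
  · simp only [bucketStep, PySem.Dict.getD_insert, if_neg (fun h : ℓ = comp.getD n 0 => hr h.symm), if_neg hr]
    by_cases hc : bk.contains (comp.getD n 0) = true
    · simp [hc]
    · simp [hc, PySem.Dict.getD_insert, if_neg (fun h : ℓ = comp.getD n 0 => hr h.symm)]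

lemma bucket_getD (comp deg : PySem.Dict Int Int) (ℓ : Int) :
    ∀ (xs : List Int) (bk : PySem.Dict Int (Int × Int × Int)),
      ((xs.foldl (bucketStep comp deg) bk).getD ℓ (0, 0, 0)) =
        ((bk.getD ℓ (0, 0, 0)).1 + (xs.countP (fun n => comp.getD n 0 == ℓ) : Int),
         (bk.getD ℓ (0, 0, 0)).2.1 + (xs.countP (fun n => comp.getD n 0 == ℓ && !flagB deg n) : Int),
         (bk.getD ℓ (0, 0, 0)).2.2 + (xs.countP (fun n => comp.getD n 0 == ℓ && flagB deg n) : Int)) := by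
  intro xs
  induction xs with
  | nil => intro bk; simp
  | cons n ns ih =>
    intro bk
    simp only [List.foldl_cons, ih, List.countP_cons, bucketStep_getD]
    by_cases hr : comp.getD n 0 = ℓ <;> by_cases hf : flagB deg n = true <;>
      simp only [hr, hf, if_pos, if_neg, if_true, if_false, beq_iff_eq, Bool.not_true,
        Bool.not_false, Bool.true_and, Bool.false_and, Bool.and_true, Bool.and_false,
        decide_true, decide_false, ite_true, ite_false] <;>
      simp [hr, hf, Prod.mk.injEq] <;> push_cast <;> omega

lemma bucket_keys (comp deg : PySem.Dict Int Int) :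
    ∀ (xs : List Int) (bk : PySem.Dict Int (Int × Int × Int)),
      (xs.foldl (bucketStep comp deg) bk).keys
        = PySem.Set.update bk.keys (xs.map (fun n => comp.getD n 0)) := by
  intro xs
  induction xs with
  | nil => intro bk; simp [PySem.Set.update]
  | cons n ns ih =>
    intro bk
    simp only [List.foldl_cons, ih, List.map_cons]
    have hst : (bucketStep comp deg bk n).keys = PySem.Set.add bk.keys (comp.getD n 0) := by
      unfold bucketStep
      simp only []
      by_cases hc : bk.contains (comp.getD n 0) = true
      · rw [if_pos hc]
        rw [PySem.Dict.keys_insert_of_contains _ _ hc]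
        rw [PySem.Set.add_of_mem ((PySem.Dict.contains_iff_mem_keys bk _).mp hc)]
      · rw [if_neg (by simp [hc])]
        have h2 : (bk.insert (comp.getD n 0) ((0:Int),(0:Int),(0:Int))).contains (comp.getD n 0) = true :=
          PySem.Dict.contains_insert_self _ _ _
        rw [PySem.Dict.keys_insert_of_contains _ _ h2]
        rw [PySem.Dict.keys_insert_of_not_contains _ _ (by simpa using hc)]
        rw [PySem.Set.add_of_not_mem (fun h => by
          rw [← PySem.Dict.contains_iff_mem_keys] at h; simp [h] at hc)]
    rw [hst]
    simp [PySem.Set.update]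


lemma headI_mem_self {l : List Int} (h : l ≠ []) : l.headI ∈ l := by
  cases l with
  | nil => exact absurd rfl h
  | cons a t => simp [List.headI]

-- bridging a DFS tree to the union-find label class of its start node
lemma tree_mem_label (nodes : List Int) (edges : List (Int × Int))
    (hpre : Pre_solution nodes edges) (comp : PySem.Dict Int Int)
    (hkeys : comp.keys = PySem.Set.ofList nodes)
    (hlab : ∀ x ∈ nodes, ∀ y ∈ nodes, (comp.getD x 0 = comp.getD y 0 ↔ Reach edges x y))
    (t : List Int) (s : Int) (hsn : s ∈ nodes)
    (hmemt : ∀ z, z ∈ t ↔ Reach edges s z) :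
    ∀ z, z ∈ t ↔ (z ∈ comp.keys ∧ comp.getD z 0 = comp.getD s 0) := by
  intro z
  constructor
  · intro hz
    have hr : Reach edges s z := (hmemt z).mp hz
    have hzn : z ∈ nodes := reach_mem_nodes hpre hsn hr
    exact ⟨hkeys ▸ (PySem.Set.mem_ofList nodes z).mpr hzn,
           (hlab z hzn s hsn).mpr (reach_symm edges hr)⟩
  · rintro ⟨hzk, hlz⟩
    have hzn : z ∈ nodes := (PySem.Set.mem_ofList nodes z).mp (hkeys ▸ hzk)
    exact (hmemt z).mpr (reach_symm edges ((hlab z hzn s hsn).mp hlz))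

lemma tree_counts (nodes : List Int) (edges : List (Int × Int))
    (hpre : Pre_solution nodes edges) (comp : PySem.Dict Int Int)
    (hkeys : comp.keys = PySem.Set.ofList nodes)
    (hlab : ∀ x ∈ nodes, ∀ y ∈ nodes, (comp.getD x 0 = comp.getD y 0 ↔ Reach edges x y))
    (t : List Int) (s : Int) (hsn : s ∈ nodes) (htnd : t.Nodup)
    (hmemt : ∀ z, z ∈ t ↔ Reach edges s z) (p : Int → Bool) (q : Int → Bool)
    (hq : ∀ n, q n = p n) :
    t.countP p
      = comp.keys.countP (fun n => (comp.getD n 0 == comp.getD s 0) && q n) := by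
  have hknd : comp.keys.Nodup := hkeys ▸ PySem.Set.nodup_ofList nodes
  have hmem2 := tree_mem_label nodes edges hpre comp hkeys hlab t s hsn hmemt
  have hperm : t.Perm (comp.keys.filter (fun z => comp.getD z 0 == comp.getD s 0)) := by
    rw [List.perm_ext_iff_of_nodup htnd (hknd.filter _)]
    intro a
    rw [hmem2 a, List.mem_filter]
    simp
  rw [hperm.countP_eq, List.countP_filter]
  apply List.countP_congr
  intro a _
  rw [hq a, Bool.and_comm]

lemma tree_size (nodes : List Int) (edges : List (Int × Int))
    (hpre : Pre_solution nodes edges) (comp : PySem.Dict Int Int)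
    (hkeys : comp.keys = PySem.Set.ofList nodes)
    (hlab : ∀ x ∈ nodes, ∀ y ∈ nodes, (comp.getD x 0 = comp.getD y 0 ↔ Reach edges x y))
    (t : List Int) (s : Int) (hsn : s ∈ nodes) (htnd : t.Nodup)
    (hmemt : ∀ z, z ∈ t ↔ Reach edges s z) :
    t.length = comp.keys.countP (fun n => comp.getD n 0 == comp.getD s 0) := by
  have h := tree_counts nodes edges hpre comp hkeys hlab t s hsn htnd hmemt
    (fun _ => true) (fun _ => true) (fun _ => rfl)
  simpa [List.countP_true] using h


-- ===== VERDICT (by name: the statement is the Claim_ definition above) =====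
theorem solution_spec : Claim_equal_solution := by
  intro nodes edges hdom hpre
  unfold Spec_solution solution solution_alt
  simp only []
  -- ===== B-side objects =====
  have hcomp := compD_spec nodes edges hpre
  obtain ⟨hkeys, hlab⟩ := hcomp
  set cd := edges.foldl ufStep
      (nodes.foldl (fun d n => d.insert n n) PySem.Dict.empty,
       nodes.foldl (fun d n => d.insert n (0 : Int)) PySem.Dict.empty) with hcd
  have hflagn : ∀ n, flagB cd.2 n = flagA (forestA nodes edges) n :=
    fun n => flag_eq nodes edges n
  have hknd : cd.1.keys.Nodup := hkeys ▸ PySem.Set.nodup_ofList nodes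
  set buckets := cd.1.keys.foldl (bucketStep cd.1 cd.2) PySem.Dict.empty with hbk
  have hbkeys : buckets.keys = PySem.Set.ofList (cd.1.keys.map (fun n => cd.1.getD n 0)) := by
    rw [hbk, bucket_keys]
    simp [PySem.Set.update, PySem.Set.ofList_eq_foldl, PySem.Dict.keys_empty]
  have hbnd : buckets.keys.Nodup := hbkeys ▸ PySem.Set.nodup_ofList _
  have hvals : buckets.values = buckets.keys.map (fun ℓ => buckets.getD ℓ (0, 0, 0)) :=
    PySem.Dict.values_eq_map_keys buckets hbnd (0, 0, 0)
  have hgd : ∀ ℓ, buckets.getD ℓ (0, 0, 0) =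
      ((cd.1.keys.countP (fun n => cd.1.getD n 0 == ℓ) : Int),
       (cd.1.keys.countP (fun n => cd.1.getD n 0 == ℓ && !flagB cd.2 n) : Int),
       (cd.1.keys.countP (fun n => cd.1.getD n 0 == ℓ && flagB cd.2 n) : Int)) := by
    intro ℓ
    rw [hbk, bucket_getD]
    simp [PySem.Dict.getD_empty]
  -- ===== A-side objects =====
  have houter := outer_fold nodes edges hpre nodes ([], PySem.Set.empty)
    (fun z hz => hz)
    ⟨by simp [PySem.Set.empty], by simp [PySem.Set.empty], by simp, by simp,
     by simp [PySem.Set.empty], by simp⟩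
  set stF := nodes.foldl (fun (st : List (List Int) × PySem.Set Int) node =>
      if PySem.Set.contains st.2 node then st
      else
        let r := dfsA (forestA nodes edges) (nodes.length + 1) [node]
          (PySem.Set.add st.2 node) []
        (st.1 ++ [r.1], r.2)) ([], PySem.Set.empty) with hstF
  obtain ⟨⟨o1, o2, o3, o4, o5, o6⟩, hcov, -⟩ := houter
  -- ===== rewrite both folds as sums =====
  rw [pair_fold_sum
      (fun tree => if (treeCount (forestA nodes edges) tree).1 == (tree.length : Int) - 1
                   then (1 : Int) else 0)
      (fun tree => if (treeCount (forestA nodes edges) tree).2 == (tree.length : Int) - 1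
                   then (1 : Int) else 0) stF.1 (0, 0)]
  rw [pair_fold_sum
      (fun t : Int × Int × Int => if t.2.1 == t.1 - 1 then (1 : Int) else 0)
      (fun t : Int × Int × Int => if t.2.2 == t.1 - 1 then (1 : Int) else 0)
      buckets.values (0, 0)]
  simp only [zero_add]
  -- per-tree label function
  have hlabelT : ∀ t ∈ stF.1, ∃ s, s ∈ nodes ∧ (∀ z, z ∈ t ↔ Reach edges s z) ∧
      cd.1.getD t.headI 0 = cd.1.getD s 0 := by
    intro t ht
    obtain ⟨s, hsn, hmemt⟩ := o4 t ht
    have hne : t ≠ [] := fun h => by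
      have := (hmemt s).mpr Relation.ReflTransGen.refl
      rw [h] at this; simp at this
    have hh : t.headI ∈ t := headI_mem_self hne
    have hr : Reach edges s t.headI := (hmemt _).mp hh
    have hhn : t.headI ∈ nodes := reach_mem_nodes hpre hsn hr
    exact ⟨s, hsn, hmemt, (hlab _ hhn _ hsn).mpr (reach_symm edges hr)⟩
  -- the per-tree triple equals the bucket triple of its label
  have htriple : ∀ t ∈ stF.1,
      ((treeCount (forestA nodes edges) t).1
          = (cd.1.keys.countP (fun n => cd.1.getD n 0 == cd.1.getD t.headI 0 && !flagB cd.2 n) : Int)) ∧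
      ((treeCount (forestA nodes edges) t).2
          = (cd.1.keys.countP (fun n => cd.1.getD n 0 == cd.1.getD t.headI 0 && flagB cd.2 n) : Int)) ∧
      ((t.length : Int)
          = (cd.1.keys.countP (fun n => cd.1.getD n 0 == cd.1.getD t.headI 0) : Int)) := by
    intro t ht
    obtain ⟨s, hsn, hmemt, hhead⟩ := hlabelT t ht
    have htnd := o3 t ht
    rw [treeCount_eq, hhead]
    refine ⟨?_, ?_, ?_⟩
    · simp only []
      rw [tree_counts nodes edges hpre cd.1 hkeys hlab t s hsn htnd hmemt
        (fun z => !flagA (forestA nodes edges) z) (fun n => !flagB cd.2 n)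
        (fun n => by simp [hflagn n])]
    · simp only []
      rw [tree_counts nodes edges hpre cd.1 hkeys hlab t s hsn htnd hmemt
        (flagA (forestA nodes edges)) (flagB cd.2) hflagn]
    · rw [tree_size nodes edges hpre cd.1 hkeys hlab t s hsn htnd hmemt]
  -- the list of tree labels is a permutation of the bucket keys
  have hpermL : (stF.1.map (fun t => cd.1.getD t.headI 0)).Perm buckets.keys := by
    rw [List.perm_ext_iff_of_nodup ?_ hbnd]
    · intro ℓ
      rw [hbkeys, PySem.Set.mem_ofList, List.mem_map, List.mem_map]
      constructor
      · rintro ⟨t, ht, hl⟩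
        obtain ⟨s, hsn, hmemt, hhead⟩ := hlabelT t ht
        have hne : t ≠ [] := fun h => by
          have := (hmemt s).mpr Relation.ReflTransGen.refl
          rw [h] at this; simp at this
        exact ⟨t.headI, (tree_mem_label nodes edges hpre cd.1 hkeys hlab t s hsn hmemt
          t.headI).mp (headI_mem_self hne) |>.1, hl⟩
      · rintro ⟨z, hzK, hl⟩
        have hzn : z ∈ nodes := (PySem.Set.mem_ofList nodes z).mp (hkeys ▸ hzK)
        have hzin : z ∈ stF.2 := hcov z hzn
        obtain ⟨t, ht, hzt⟩ := (o1 z).mp hzin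
        obtain ⟨s, hsn, hmemt, hhead⟩ := hlabelT t ht
        refine ⟨t, ht, ?_⟩
        rw [hhead]
        have hr : Reach edges s z := (hmemt z).mp hzt
        rw [← hl]
        exact ((hlab z hzn s hsn).mpr (reach_symm edges hr)).symm
    · show List.Pairwise _ _
      rw [List.pairwise_map]
      refine List.Pairwise.imp_of_mem ?_ o6
      intro t u ht hu hdisj heq
      obtain ⟨st, hstn, hmemtt, hheadt⟩ := hlabelT t ht
      obtain ⟨su, hsun, hmemtu, hheadu⟩ := hlabelT u hu
      have hlabeq : cd.1.getD st 0 = cd.1.getD su 0 := by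
        rw [← hheadt, ← hheadu, heq]
      have hsr : Reach edges st su := (hlab st hstn su hsun).mp hlabeq
      have hsu_t : su ∈ t := (hmemtt su).mpr hsr
      have hsu_u : su ∈ u := (hmemtu su).mpr Relation.ReflTransGen.refl
      exact hdisj su hsu_t hsu_u
  -- assemble
  have hA1 : stF.1.map (fun tree =>
        if (treeCount (forestA nodes edges) tree).1 == (tree.length : Int) - 1
        then (1 : Int) else 0)
      = stF.1.map ((fun ℓ =>
          if (cd.1.keys.countP (fun n => cd.1.getD n 0 == ℓ && !flagB cd.2 n) : Int)
              == (cd.1.keys.countP (fun n => cd.1.getD n 0 == ℓ) : Int) - 1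
          then (1 : Int) else 0) ∘ (fun t => cd.1.getD t.headI 0)) := by
    apply List.map_congr_left
    intro t ht
    obtain ⟨h1, h2, h3⟩ := htriple t ht
    simp only [Function.comp_apply, h1, h2, h3]
  have hA2 : stF.1.map (fun tree =>
        if (treeCount (forestA nodes edges) tree).2 == (tree.length : Int) - 1
        then (1 : Int) else 0)
      = stF.1.map ((fun ℓ =>
          if (cd.1.keys.countP (fun n => cd.1.getD n 0 == ℓ && flagB cd.2 n) : Int)
              == (cd.1.keys.countP (fun n => cd.1.getD n 0 == ℓ) : Int) - 1
          then (1 : Int) else 0) ∘ (fun t => cd.1.getD t.headI 0)) := by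
    apply List.map_congr_left
    intro t ht
    obtain ⟨h1, h2, h3⟩ := htriple t ht
    simp only [Function.comp_apply, h1, h2, h3]
  have hB1 : buckets.values.map (fun t : Int × Int × Int =>
        if t.2.1 == t.1 - 1 then (1 : Int) else 0)
      = buckets.keys.map (fun ℓ =>
          if (cd.1.keys.countP (fun n => cd.1.getD n 0 == ℓ && !flagB cd.2 n) : Int)
              == (cd.1.keys.countP (fun n => cd.1.getD n 0 == ℓ) : Int) - 1
          then (1 : Int) else 0) := by
    rw [hvals, List.map_map]
    apply List.map_congr_left
    intro ℓ _
    simp only [Function.comp_apply, hgd ℓ]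
  have hB2 : buckets.values.map (fun t : Int × Int × Int =>
        if t.2.2 == t.1 - 1 then (1 : Int) else 0)
      = buckets.keys.map (fun ℓ =>
          if (cd.1.keys.countP (fun n => cd.1.getD n 0 == ℓ && flagB cd.2 n) : Int)
              == (cd.1.keys.countP (fun n => cd.1.getD n 0 == ℓ) : Int) - 1
          then (1 : Int) else 0) := by
    rw [hvals, List.map_map]
    apply List.map_congr_left
    intro ℓ _
    simp only [Function.comp_apply, hgd ℓ]
  rw [hA1, hA2, hB1, hB2, ← List.map_map, ← List.map_map]
  rw [(hpermL.map _).sum_eq, (hpermL.map _).sum_eq]
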